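-- pv_equiv track=rewrite | github.com/NOIZYLAB-io/NOIZYLAB | _ORGANIZED/BY_TYPE/PYTHON/simple_mode.py | simple_text
-- ===== SOURCE A (Python) =====
-- def simple_text(text: str):
--     """
--     Converts technical explanations into ultra-simple language.
--     Example:
--     'Your SSD is failing' -> 'Your computer's storage part is breaking.'
--     """
--     replacements = {
--         "SSD": "storage part",
--         "CPU": "computer brain",
--         "RAM": "short-term memory",
--         "GPU": "graphics part",
--         "network": "internet connection"
--     }
--
--     out = text
--     for k, v in replacements.items():
--         out = out.replace(k, v)
--
--     return out
-- ===== SOURCE B (Python) =====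
-- def simple_text(text: str):
--     """
--     Converts technical explanations into ultra-simple language.
--     Single left-to-right scan: at each position try each known term;
--     on a match emit its simple phrase and skip past it, else copy the char.
--     """
--     replacements = {
--         "SSD": "storage part",
--         "CPU": "computer brain",
--         "RAM": "short-term memory",
--         "GPU": "graphics part",
--         "network": "internet connection"
--     }
--
--     out = []
--     i = 0
--     n = len(text)
--     while i < n:
--         for k, v in replacements.items():
--             if text.startswith(k, i):
--                 out.append(v)
--                 i += len(k)
--                 break
--         else:
--             out.append(text[i])
--             i += 1
--     return "".join(out)
-- ===== Notes on version B (the rewrite author's own statement) =====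
-- stated objective: alternative
-- what changed: Replaces A's five sequential full-string .replace passes by a single left-to-right scan that tries the five keys at each position via a table, emitting the phrase or copying the character.
-- intended difference: On texts containing the substring 'CPUetwork', A's CPU pass creates a fresh occurrence of the network key spanning the boundary between the inserted phrase and the following text, and A's final pass replaces that too (on the witness input A returns 'computer braiinternet connection'); B simply emits the CPU phrase and copies the following characters unchanged, the intended value since the original text never mentioned a network. — e.g. on simple_text("CPUetwork"): A returns "computer braiinternet connection", B returns "computer brainetwork"
import Mathlib
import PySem

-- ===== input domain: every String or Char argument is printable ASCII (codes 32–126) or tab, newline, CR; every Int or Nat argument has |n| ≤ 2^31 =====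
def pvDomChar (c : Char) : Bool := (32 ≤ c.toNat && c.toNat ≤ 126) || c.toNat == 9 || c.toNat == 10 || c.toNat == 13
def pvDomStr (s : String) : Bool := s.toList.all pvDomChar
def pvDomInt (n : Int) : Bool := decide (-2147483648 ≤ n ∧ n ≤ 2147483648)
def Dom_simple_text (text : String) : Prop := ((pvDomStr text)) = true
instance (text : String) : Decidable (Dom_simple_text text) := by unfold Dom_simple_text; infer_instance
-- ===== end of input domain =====

-- B replaces A's five sequential str.replace passes with one left-to-right table-driven scan;
-- on texts containing "CPUetwork" A's cascade re-replaces text its CPU pass produced and B returns the intended value (see D_).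


-- ===== PORT A =====
-- A: build the replacements dict, then fold over its items doing out = out.replace(k, v).
def simple_text (text : String) : String :=
  let replacements : PySem.Dict String String :=
    PySem.Dict.ofList [("SSD", "storage part"), ("CPU", "computer brain"),
      ("RAM", "short-term memory"), ("GPU", "graphics part"), ("network", "internet connection")]
  replacements.items.foldl (fun out kv => PySem.Str.replace out kv.1 kv.2) text

-- ===== PORT B =====
-- B: one scan over the characters; at each position try the keys in dict order (text.startswith(k, i)),
-- emit the phrase and jump past the key on a match, else copy one character.
def simpleGo : List Char → List Char
  | [] => []
  | c :: t =>
    if ['S','S','D'] <+: (c :: t) then "storage part".toList ++ simpleGo (t.drop 2)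
    else if ['C','P','U'] <+: (c :: t) then "computer brain".toList ++ simpleGo (t.drop 2)
    else if ['R','A','M'] <+: (c :: t) then "short-term memory".toList ++ simpleGo (t.drop 2)
    else if ['G','P','U'] <+: (c :: t) then "graphics part".toList ++ simpleGo (t.drop 2)
    else if ['n','e','t','w','o','r','k'] <+: (c :: t) then "internet connection".toList ++ simpleGo (t.drop 6)
    else c :: simpleGo t
  termination_by l => l.length
  decreasing_by all_goals (simp [List.length_drop]; try omega)

def simple_text_alt (text : String) : String := String.ofList (simpleGo text.toList)

-- ===== PRECONDITION & SPEC =====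
-- On texts containing "CPUetwork" A's CPU pass creates a fresh occurrence of the network key spanning
-- the replacement boundary, which A's final pass replaces too; B copies the trailing characters
-- unchanged after the CPU phrase, the intended value.
def D_simple_text (text : String) : Prop := PySem.Str.isIn "CPUetwork" text = true
instance (text : String) : Decidable (D_simple_text text) := by unfold D_simple_text; infer_instance
def Spec_simple_text (text : String) (out : String) : Prop := ¬ D_simple_text text → out = simple_text_alt text
instance (text : String) (out : String) : Decidable (Spec_simple_text text out) := by unfold Spec_simple_text; infer_instance
def pvDiffWitness_simple_text : String := "CPUetwork"
def pvDiffWitnessOut_simple_text : String × String := ("computer braiinternet connection", "computer brainetwork")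

-- ===== CLAIM (what is proved, stated in full; the proofs are below) =====
def Claim_unchanged_simple_text : Prop := ∀ (text : String), Dom_simple_text text → Spec_simple_text text (simple_text text)
def Claim_changed_simple_text : Prop := Dom_simple_text (pvDiffWitness_simple_text) ∧ D_simple_text (pvDiffWitness_simple_text) ∧ simple_text (pvDiffWitness_simple_text) = pvDiffWitnessOut_simple_text.1 ∧ simple_text_alt (pvDiffWitness_simple_text) = pvDiffWitnessOut_simple_text.2 ∧ pvDiffWitnessOut_simple_text.1 ≠ pvDiffWitnessOut_simple_text.2
def Claim_exact_simple_text : Prop := ∀ (text : String), Dom_simple_text text → D_simple_text text → simple_text text ≠ simple_text_alt text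

-- ===== LEMMAS AND PROOFS =====

set_option maxRecDepth 2000

def rep1 (c₀ : Char) (kt v : List Char) : List Char → List Char
  | [] => []
  | c :: t =>
    if (c₀ :: kt) <+: (c :: t) then v ++ rep1 c₀ kt v (t.drop kt.length)
    else c :: rep1 c₀ kt v t
  termination_by l => l.length
  decreasing_by all_goals (simp [List.length_drop]; try omega)

lemma go_eq_rep1 (c₀ : Char) (kt v : List Char) :
    ∀ fuel l acc, l.length ≤ fuel →
      PySem.Chars.replace.go (c₀ :: kt) v fuel l acc = acc.reverse ++ rep1 c₀ kt v l := by
  intro fuel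
  induction fuel with
  | zero =>
    intro l acc h
    have : l = [] := by cases l <;> simp_all
    subst this
    simp [PySem.Chars.replace.go, rep1]
  | succ n ih =>
    intro l acc h
    cases l with
    | nil => simp [PySem.Chars.replace.go, rep1]
    | cons c t =>
      rw [PySem.Chars.replace.go]
      by_cases hp : (c₀ :: kt) <+: (c :: t)
      · have hb : (c₀ :: kt).isPrefixOf (c :: t) = true := List.isPrefixOf_iff_prefix.mpr hp
        simp only [hb, if_pos]
        rw [ih]
        · rw [rep1]
          simp [hp, List.drop_succ_cons]
        · simp only [List.length_drop, List.length_cons]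
          simp only [List.length_cons] at h
          omega
      · have hb : (c₀ :: kt).isPrefixOf (c :: t) = false :=
          (Bool.eq_false_iff).mpr (fun hb => hp (List.isPrefixOf_iff_prefix.mp hb))
        simp only [hb, Bool.false_eq_true, if_false]
        rw [ih t (c :: acc) (by simp at h ⊢; omega)]
        rw [rep1]
        simp [hp]

lemma replace_eq_rep1 (c₀ : Char) (kt v s : List Char) :
    PySem.Chars.replace s (c₀ :: kt) v = rep1 c₀ kt v s := by
  rw [PySem.Chars.replace]
  simp [go_eq_rep1 c₀ kt v s.length s [] le_rfl]

lemma rep1_pos (c₀ : Char) (kt v : List Char) (c : Char) (t : List Char)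
    (h : (c₀ :: kt) <+: (c :: t)) :
    rep1 c₀ kt v (c :: t) = v ++ rep1 c₀ kt v (t.drop kt.length) := by
  rw [rep1]; simp [h]

lemma rep1_neg (c₀ : Char) (kt v : List Char) (c : Char) (t : List Char)
    (h : ¬ (c₀ :: kt) <+: (c :: t)) :
    rep1 c₀ kt v (c :: t) = c :: rep1 c₀ kt v t := by
  rw [rep1]; simp [h]

lemma rep1_append_left (c₀ : Char) (kt v : List Char) :
    ∀ (u l : List Char), (∀ c ∈ u, c ≠ c₀) → rep1 c₀ kt v (u ++ l) = u ++ rep1 c₀ kt v l := by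
  intro u
  induction u with
  | nil => intro l _; rfl
  | cons c u' ih =>
    intro l h
    have hc : c ≠ c₀ := h c (by simp)
    have hnp : ¬ (c₀ :: kt) <+: (c :: (u' ++ l)) := by
      intro hp
      exact hc ((List.cons_prefix_cons.mp hp).1.symm)
    rw [List.cons_append, rep1_neg _ _ _ _ _ hnp, ih l (fun x hx => h x (by simp [hx])),
      List.cons_append]

lemma rep1_reflect (c₀ vh : Char) (kt vt : List Char) :
    ∀ l w, (∀ c ∈ w, c ≠ c₀ ∧ c ≠ vh) → w <+: rep1 c₀ kt (vh :: vt) l → w <+: l := by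
  intro l
  induction l with
  | nil => intro w _ h; rwa [rep1] at h
  | cons c t ih =>
    intro w hw hpre
    by_cases hp : (c₀ :: kt) <+: (c :: t)
    · rw [rep1_pos _ _ _ _ _ hp] at hpre
      cases w with
      | nil => exact List.nil_prefix
      | cons w0 w' =>
        exact absurd (List.cons_prefix_cons.mp hpre).1 (hw w0 (by simp)).2
    · rw [rep1_neg _ _ _ _ _ hp] at hpre
      cases w with
      | nil => exact List.nil_prefix
      | cons w0 w' =>
        obtain ⟨he, hw'⟩ := List.cons_prefix_cons.mp hpre
        subst he
        exact List.cons_prefix_cons.mpr ⟨rfl, ih w' (fun x hx => hw x (by simp [hx])) hw'⟩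

-- the full five-pass cascade of A, on char lists
def chain (l : List Char) : List Char :=
  rep1 'n' ['e','t','w','o','r','k'] "internet connection".toList
    (rep1 'G' ['P','U'] "graphics part".toList
      (rep1 'R' ['A','M'] "short-term memory".toList
        (rep1 'C' ['P','U'] "computer brain".toList
          (rep1 'S' ['S','D'] "storage part".toList l))))

-- reflection of a prefix w through the first i passes, for w avoiding the key/value heads
lemma refl1 (w l : List Char) (h : ∀ c ∈ w, c ≠ 'S' ∧ c ≠ 's') :
    w <+: rep1 'S' ['S','D'] "storage part".toList l → w <+: l :=
  rep1_reflect 'S' 's' ['S','D'] "torage part".toList l w h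

lemma refl2 (w l : List Char) (h : ∀ c ∈ w, (c ≠ 'S' ∧ c ≠ 's') ∧ (c ≠ 'C' ∧ c ≠ 'c')) :
    w <+: rep1 'C' ['P','U'] "computer brain".toList
            (rep1 'S' ['S','D'] "storage part".toList l) → w <+: l :=
  fun hp => refl1 w l (fun c hc => (h c hc).1)
    (rep1_reflect 'C' 'c' ['P','U'] "omputer brain".toList _ w (fun c hc => (h c hc).2) hp)

lemma refl3 (w l : List Char)
    (h : ∀ c ∈ w, ((c ≠ 'S' ∧ c ≠ 's') ∧ (c ≠ 'C' ∧ c ≠ 'c')) ∧ (c ≠ 'R' ∧ c ≠ 's')) :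
    w <+: rep1 'R' ['A','M'] "short-term memory".toList
            (rep1 'C' ['P','U'] "computer brain".toList
              (rep1 'S' ['S','D'] "storage part".toList l)) → w <+: l :=
  fun hp => refl2 w l (fun c hc => (h c hc).1)
    (rep1_reflect 'R' 's' ['A','M'] "hort-term memory".toList _ w (fun c hc => (h c hc).2) hp)

lemma refl4 (w l : List Char)
    (h : ∀ c ∈ w, (((c ≠ 'S' ∧ c ≠ 's') ∧ (c ≠ 'C' ∧ c ≠ 'c')) ∧ (c ≠ 'R' ∧ c ≠ 's')) ∧ (c ≠ 'G' ∧ c ≠ 'g')) :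
    w <+: rep1 'G' ['P','U'] "graphics part".toList
            (rep1 'R' ['A','M'] "short-term memory".toList
              (rep1 'C' ['P','U'] "computer brain".toList
                (rep1 'S' ['S','D'] "storage part".toList l))) → w <+: l :=
  fun hp => refl3 w l (fun c hc => (h c hc).1)
    (rep1_reflect 'G' 'g' ['P','U'] "raphics part".toList _ w (fun c hc => (h c hc).2) hp)

def badL : List Char := ['C','P','U','e','t','w','o','r','k']

lemma infix_of_infix_tail {u t : List Char} (b : List Char) (h : b <:+: t) : b <:+: u ++ t :=
  h.trans (List.suffix_append u t).isInfix

lemma r5_brain (Y : List Char) (hY : ¬ (['e','t','w','o','r','k'] : List Char) <+: Y) :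
    rep1 'n' ['e','t','w','o','r','k'] "internet connection".toList ("computer brain".toList ++ Y)
      = "computer brain".toList ++ rep1 'n' ['e','t','w','o','r','k'] "internet connection".toList Y := by
  rw [show "computer brain".toList = "computer brai".toList ++ ['n'] from rfl, List.append_assoc,
    show ((['n'] : List Char) ++ Y) = 'n' :: Y from rfl,
    rep1_append_left 'n' ['e','t','w','o','r','k'] _ "computer brai".toList _ (by simp),
    rep1_neg _ _ _ _ _ (fun hp => hY (List.cons_prefix_cons.mp hp).2)]
  simp

lemma chain_eq : ∀ (n : Nat) (l : List Char), l.length ≤ n → ¬ badL <:+: l → chain l = simpleGo l := by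
  intro n
  induction n with
  | zero =>
    intro l hl _
    have : l = [] := by cases l <;> simp_all
    subst this
    simp [chain, rep1, simpleGo]
  | succ n ih =>
    intro l hl hD
    cases l with
    | nil => simp [chain, rep1, simpleGo]
    | cons c t =>
      by_cases h1 : ['S','S','D'] <+: (c :: t)
      · -- SSD branch
        obtain ⟨t3, he⟩ := h1
        rw [show (['S','S','D'] ++ t3 : List Char) = 'S'::'S'::'D'::t3 from rfl] at he
        rw [← he] at hl hD ⊢
        clear he
        have hp : ('S' :: ['S','D'] : List Char) <+: 'S'::'S'::'D'::t3 := ⟨t3, rfl⟩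
        rw [chain, rep1_pos _ _ _ _ _ hp]
        have hd : (('S'::'D'::t3 : List Char)).drop (['S','D'] : List Char).length = t3 := rfl
        rw [hd]
        rw [rep1_append_left 'C' ['P','U'] _ "storage part".toList _ (by simp)]
        rw [rep1_append_left 'R' ['A','M'] _ "storage part".toList _ (by simp)]
        rw [rep1_append_left 'G' ['P','U'] _ "storage part".toList _ (by simp)]
        rw [rep1_append_left 'n' ['e','t','w','o','r','k'] _ "storage part".toList _ (by simp)]
        have hsg : simpleGo ('S'::'S'::'D'::t3) = "storage part".toList ++ simpleGo t3 := by
          rw [simpleGo]; simp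
        rw [hsg]
        have hih := ih t3 (by simp at hl ⊢; omega)
          (fun hb => hD (infix_of_infix_tail (u := ['S','S','D']) badL hb))
        rw [chain] at hih
        rw [hih]
      · by_cases h2 : ['C','P','U'] <+: (c :: t)
        · obtain ⟨t3, he⟩ := h2
          rw [show (['C','P','U'] ++ t3 : List Char) = 'C'::'P'::'U'::t3 from rfl] at he
          rw [← he] at hl hD ⊢
          clear he
          have e1 : rep1 'S' ['S','D'] "storage part".toList ('C'::'P'::'U'::t3)
              = 'C'::'P'::'U':: rep1 'S' ['S','D'] "storage part".toList t3 :=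
            rep1_append_left 'S' ['S','D'] "storage part".toList ['C','P','U'] t3 (by simp)
          have hp2 : ('C' :: ['P','U'] : List Char) <+:
              'C'::'P'::'U':: rep1 'S' ['S','D'] "storage part".toList t3 := ⟨_, rfl⟩
          rw [chain, e1, rep1_pos _ _ _ _ _ hp2,
            show (('P'::'U':: rep1 'S' ['S','D'] "storage part".toList t3 : List Char)).drop
              ((['P','U'] : List Char)).length = rep1 'S' ['S','D'] "storage part".toList t3 from rfl,
            rep1_append_left 'R' ['A','M'] _ "computer brain".toList _ (by simp),
            rep1_append_left 'G' ['P','U'] _ "computer brain".toList _ (by simp)]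
          have hY : ¬ (['e','t','w','o','r','k'] : List Char) <+:
              rep1 'G' ['P','U'] "graphics part".toList
                (rep1 'R' ['A','M'] "short-term memory".toList
                  (rep1 'C' ['P','U'] "computer brain".toList
                    (rep1 'S' ['S','D'] "storage part".toList t3))) := by
            intro hpre
            obtain ⟨z, hz⟩ := refl4 ['e','t','w','o','r','k'] t3 (by simp) hpre
            exact hD ⟨[], z, by rw [← hz]; rfl⟩
          rw [r5_brain _ hY]
          have hsg : simpleGo ('C'::'P'::'U'::t3) = "computer brain".toList ++ simpleGo t3 := by
            rw [simpleGo]; simp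
          rw [hsg]
          have hih := ih t3 (by simp at hl ⊢; omega)
            (fun hb => hD (infix_of_infix_tail (u := ['C','P','U']) badL hb))
          rw [chain] at hih
          rw [hih]
        · by_cases h3 : ['R','A','M'] <+: (c :: t)
          · obtain ⟨t3, he⟩ := h3
            rw [show (['R','A','M'] ++ t3 : List Char) = 'R'::'A'::'M'::t3 from rfl] at he
            rw [← he] at hl hD ⊢
            clear he
            have e1 : rep1 'S' ['S','D'] "storage part".toList ('R'::'A'::'M'::t3)
                = 'R'::'A'::'M':: rep1 'S' ['S','D'] "storage part".toList t3 :=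
              rep1_append_left 'S' ['S','D'] "storage part".toList ['R','A','M'] t3 (by simp)
            have e2 : rep1 'C' ['P','U'] "computer brain".toList
                ('R'::'A'::'M':: rep1 'S' ['S','D'] "storage part".toList t3)
                = 'R'::'A'::'M':: rep1 'C' ['P','U'] "computer brain".toList
                    (rep1 'S' ['S','D'] "storage part".toList t3) :=
              rep1_append_left 'C' ['P','U'] "computer brain".toList ['R','A','M'] _ (by simp)
            have hp3 : ('R' :: ['A','M'] : List Char) <+:
                'R'::'A'::'M':: rep1 'C' ['P','U'] "computer brain".toList
                  (rep1 'S' ['S','D'] "storage part".toList t3) := ⟨_, rfl⟩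
            rw [chain, e1, e2, rep1_pos _ _ _ _ _ hp3,
              show (('A'::'M':: rep1 'C' ['P','U'] "computer brain".toList
                  (rep1 'S' ['S','D'] "storage part".toList t3) : List Char)).drop
                ((['A','M'] : List Char)).length
                = rep1 'C' ['P','U'] "computer brain".toList
                    (rep1 'S' ['S','D'] "storage part".toList t3) from rfl,
              rep1_append_left 'G' ['P','U'] _ "short-term memory".toList _ (by simp),
              rep1_append_left 'n' ['e','t','w','o','r','k'] _ "short-term memory".toList _ (by simp)]
            have hsg : simpleGo ('R'::'A'::'M'::t3) = "short-term memory".toList ++ simpleGo t3 := by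
              rw [simpleGo]; simp
            rw [hsg]
            have hih := ih t3 (by simp at hl ⊢; omega)
              (fun hb => hD (infix_of_infix_tail (u := ['R','A','M']) badL hb))
            rw [chain] at hih
            rw [hih]
          · by_cases h4 : ['G','P','U'] <+: (c :: t)
            · obtain ⟨t3, he⟩ := h4
              rw [show (['G','P','U'] ++ t3 : List Char) = 'G'::'P'::'U'::t3 from rfl] at he
              rw [← he] at hl hD ⊢
              clear he
              have e1 : rep1 'S' ['S','D'] "storage part".toList ('G'::'P'::'U'::t3)
                  = 'G'::'P'::'U':: rep1 'S' ['S','D'] "storage part".toList t3 :=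
                rep1_append_left 'S' ['S','D'] "storage part".toList ['G','P','U'] t3 (by simp)
              have e2 : rep1 'C' ['P','U'] "computer brain".toList
                  ('G'::'P'::'U':: rep1 'S' ['S','D'] "storage part".toList t3)
                  = 'G'::'P'::'U':: rep1 'C' ['P','U'] "computer brain".toList
                      (rep1 'S' ['S','D'] "storage part".toList t3) :=
                rep1_append_left 'C' ['P','U'] "computer brain".toList ['G','P','U'] _ (by simp)
              have e3 : rep1 'R' ['A','M'] "short-term memory".toList
                  ('G'::'P'::'U':: rep1 'C' ['P','U'] "computer brain".toList
                    (rep1 'S' ['S','D'] "storage part".toList t3))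
                  = 'G'::'P'::'U':: rep1 'R' ['A','M'] "short-term memory".toList
                      (rep1 'C' ['P','U'] "computer brain".toList
                        (rep1 'S' ['S','D'] "storage part".toList t3)) :=
                rep1_append_left 'R' ['A','M'] "short-term memory".toList ['G','P','U'] _ (by simp)
              have hp4 : ('G' :: ['P','U'] : List Char) <+:
                  'G'::'P'::'U':: rep1 'R' ['A','M'] "short-term memory".toList
                    (rep1 'C' ['P','U'] "computer brain".toList
                      (rep1 'S' ['S','D'] "storage part".toList t3)) := ⟨_, rfl⟩
              rw [chain, e1, e2, e3, rep1_pos _ _ _ _ _ hp4,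
                show (('P'::'U':: rep1 'R' ['A','M'] "short-term memory".toList
                    (rep1 'C' ['P','U'] "computer brain".toList
                      (rep1 'S' ['S','D'] "storage part".toList t3)) : List Char)).drop
                  ((['P','U'] : List Char)).length
                  = rep1 'R' ['A','M'] "short-term memory".toList
                      (rep1 'C' ['P','U'] "computer brain".toList
                        (rep1 'S' ['S','D'] "storage part".toList t3)) from rfl,
                rep1_append_left 'n' ['e','t','w','o','r','k'] _ "graphics part".toList _ (by simp)]
              have hsg : simpleGo ('G'::'P'::'U'::t3) = "graphics part".toList ++ simpleGo t3 := by
                rw [simpleGo]; simp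
              rw [hsg]
              have hih := ih t3 (by simp at hl ⊢; omega)
                (fun hb => hD (infix_of_infix_tail (u := ['G','P','U']) badL hb))
              rw [chain] at hih
              rw [hih]
            · by_cases h5 : ['n','e','t','w','o','r','k'] <+: (c :: t)
              · obtain ⟨t7, he⟩ := h5
                rw [show (['n','e','t','w','o','r','k'] ++ t7 : List Char)
                  = 'n'::'e'::'t'::'w'::'o'::'r'::'k'::t7 from rfl] at he
                rw [← he] at hl hD ⊢
                clear he
                have e1 : rep1 'S' ['S','D'] "storage part".toList
                    ('n'::'e'::'t'::'w'::'o'::'r'::'k'::t7)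
                    = 'n'::'e'::'t'::'w'::'o'::'r'::'k':: rep1 'S' ['S','D'] "storage part".toList t7 :=
                  rep1_append_left 'S' ['S','D'] "storage part".toList ['n','e','t','w','o','r','k'] t7 (by simp)
                have e2 : rep1 'C' ['P','U'] "computer brain".toList
                    ('n'::'e'::'t'::'w'::'o'::'r'::'k':: rep1 'S' ['S','D'] "storage part".toList t7)
                    = 'n'::'e'::'t'::'w'::'o'::'r'::'k':: rep1 'C' ['P','U'] "computer brain".toList
                        (rep1 'S' ['S','D'] "storage part".toList t7) :=
                  rep1_append_left 'C' ['P','U'] "computer brain".toList ['n','e','t','w','o','r','k'] _ (by simp)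
                have e3 : rep1 'R' ['A','M'] "short-term memory".toList
                    ('n'::'e'::'t'::'w'::'o'::'r'::'k':: rep1 'C' ['P','U'] "computer brain".toList
                      (rep1 'S' ['S','D'] "storage part".toList t7))
                    = 'n'::'e'::'t'::'w'::'o'::'r'::'k':: rep1 'R' ['A','M'] "short-term memory".toList
                        (rep1 'C' ['P','U'] "computer brain".toList
                          (rep1 'S' ['S','D'] "storage part".toList t7)) :=
                  rep1_append_left 'R' ['A','M'] "short-term memory".toList ['n','e','t','w','o','r','k'] _ (by simp)
                have e4 : rep1 'G' ['P','U'] "graphics part".toList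
                    ('n'::'e'::'t'::'w'::'o'::'r'::'k':: rep1 'R' ['A','M'] "short-term memory".toList
                      (rep1 'C' ['P','U'] "computer brain".toList
                        (rep1 'S' ['S','D'] "storage part".toList t7)))
                    = 'n'::'e'::'t'::'w'::'o'::'r'::'k':: rep1 'G' ['P','U'] "graphics part".toList
                        (rep1 'R' ['A','M'] "short-term memory".toList
                          (rep1 'C' ['P','U'] "computer brain".toList
                            (rep1 'S' ['S','D'] "storage part".toList t7))) :=
                  rep1_append_left 'G' ['P','U'] "graphics part".toList ['n','e','t','w','o','r','k'] _ (by simp)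
                have hp5 : ('n' :: ['e','t','w','o','r','k'] : List Char) <+:
                    'n'::'e'::'t'::'w'::'o'::'r'::'k':: rep1 'G' ['P','U'] "graphics part".toList
                      (rep1 'R' ['A','M'] "short-term memory".toList
                        (rep1 'C' ['P','U'] "computer brain".toList
                          (rep1 'S' ['S','D'] "storage part".toList t7))) := ⟨_, rfl⟩
                rw [chain, e1, e2, e3, e4, rep1_pos _ _ _ _ _ hp5,
                  show (('e'::'t'::'w'::'o'::'r'::'k':: rep1 'G' ['P','U'] "graphics part".toList
                      (rep1 'R' ['A','M'] "short-term memory".toList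
                        (rep1 'C' ['P','U'] "computer brain".toList
                          (rep1 'S' ['S','D'] "storage part".toList t7))) : List Char)).drop
                    ((['e','t','w','o','r','k'] : List Char)).length
                    = rep1 'G' ['P','U'] "graphics part".toList
                        (rep1 'R' ['A','M'] "short-term memory".toList
                          (rep1 'C' ['P','U'] "computer brain".toList
                            (rep1 'S' ['S','D'] "storage part".toList t7))) from rfl]
                have hsg : simpleGo ('n'::'e'::'t'::'w'::'o'::'r'::'k'::t7)
                    = "internet connection".toList ++ simpleGo t7 := by
                  rw [simpleGo]; simp
                rw [hsg]
                have hih := ih t7 (by simp at hl ⊢; omega)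
                  (fun hb => hD (infix_of_infix_tail (u := ['n','e','t','w','o','r','k']) badL hb))
                rw [chain] at hih
                rw [hih]
              · -- no key matches at the head: the character is copied by every pass
                have e1 : rep1 'S' ['S','D'] "storage part".toList (c :: t)
                    = c :: rep1 'S' ['S','D'] "storage part".toList t := rep1_neg _ _ _ _ _ h1
                have hn2 : ¬ ('C' :: ['P','U'] : List Char) <+:
                    c :: rep1 'S' ['S','D'] "storage part".toList t := by
                  intro hp
                  obtain ⟨hc, hw⟩ := List.cons_prefix_cons.mp hp
                  exact h2 (List.cons_prefix_cons.mpr ⟨hc, refl1 _ _ (by simp) hw⟩)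
                have e2 := rep1_neg 'C' ['P','U'] "computer brain".toList _ _ hn2
                have hn3 : ¬ ('R' :: ['A','M'] : List Char) <+:
                    c :: rep1 'C' ['P','U'] "computer brain".toList
                      (rep1 'S' ['S','D'] "storage part".toList t) := by
                  intro hp
                  obtain ⟨hc, hw⟩ := List.cons_prefix_cons.mp hp
                  exact h3 (List.cons_prefix_cons.mpr ⟨hc, refl2 _ _ (by simp) hw⟩)
                have e3 := rep1_neg 'R' ['A','M'] "short-term memory".toList _ _ hn3
                have hn4 : ¬ ('G' :: ['P','U'] : List Char) <+:
                    c :: rep1 'R' ['A','M'] "short-term memory".toList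
                      (rep1 'C' ['P','U'] "computer brain".toList
                        (rep1 'S' ['S','D'] "storage part".toList t)) := by
                  intro hp
                  obtain ⟨hc, hw⟩ := List.cons_prefix_cons.mp hp
                  exact h4 (List.cons_prefix_cons.mpr ⟨hc, refl3 _ _ (by simp) hw⟩)
                have e4 := rep1_neg 'G' ['P','U'] "graphics part".toList _ _ hn4
                have hn5 : ¬ ('n' :: ['e','t','w','o','r','k'] : List Char) <+:
                    c :: rep1 'G' ['P','U'] "graphics part".toList
                      (rep1 'R' ['A','M'] "short-term memory".toList
                        (rep1 'C' ['P','U'] "computer brain".toList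
                          (rep1 'S' ['S','D'] "storage part".toList t))) := by
                  intro hp
                  obtain ⟨hc, hw⟩ := List.cons_prefix_cons.mp hp
                  exact h5 (List.cons_prefix_cons.mpr ⟨hc, refl4 _ _ (by simp) hw⟩)
                have e5 := rep1_neg 'n' ['e','t','w','o','r','k'] "internet connection".toList _ _ hn5
                rw [chain, e1, e2, e3, e4, e5]
                have hsg : simpleGo (c :: t) = c :: simpleGo t := by
                  rw [simpleGo, if_neg h1, if_neg h2, if_neg h3, if_neg h4, if_neg h5]
                rw [hsg]
                have hih := ih t (by simp at hl ⊢; omega)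
                  (fun hb => hD (hb.trans (List.suffix_cons c t).isInfix))
                rw [chain] at hih
                rw [hih]

lemma chainEq_final (text : String) (h : ¬ badL <:+: text.toList) :
    chain text.toList = simpleGo text.toList :=
  chain_eq text.toList.length text.toList le_rfl h

lemma toList_simple_text (text : String) :
    (simple_text text).toList = chain text.toList := by
  have hA : simple_text text =
      PySem.Str.replace (PySem.Str.replace (PySem.Str.replace (PySem.Str.replace
        (PySem.Str.replace text "SSD" "storage part") "CPU" "computer brain")
        "RAM" "short-term memory") "GPU" "graphics part") "network" "internet connection" := rfl
  have e1 : ∀ s : List Char, PySem.Chars.replace s "SSD".toList "storage part".toList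
      = rep1 'S' ['S','D'] "storage part".toList s :=
    fun s => replace_eq_rep1 'S' ['S','D'] "storage part".toList s
  have e2 : ∀ s : List Char, PySem.Chars.replace s "CPU".toList "computer brain".toList
      = rep1 'C' ['P','U'] "computer brain".toList s :=
    fun s => replace_eq_rep1 'C' ['P','U'] "computer brain".toList s
  have e3 : ∀ s : List Char, PySem.Chars.replace s "RAM".toList "short-term memory".toList
      = rep1 'R' ['A','M'] "short-term memory".toList s :=
    fun s => replace_eq_rep1 'R' ['A','M'] "short-term memory".toList s
  have e4 : ∀ s : List Char, PySem.Chars.replace s "GPU".toList "graphics part".toList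
      = rep1 'G' ['P','U'] "graphics part".toList s :=
    fun s => replace_eq_rep1 'G' ['P','U'] "graphics part".toList s
  have e5 : ∀ s : List Char, PySem.Chars.replace s "network".toList "internet connection".toList
      = rep1 'n' ['e','t','w','o','r','k'] "internet connection".toList s :=
    fun s => replace_eq_rep1 'n' ['e','t','w','o','r','k'] "internet connection".toList s
  rw [hA, PySem.Str.toList_replace, PySem.Str.toList_replace, PySem.Str.toList_replace,
    PySem.Str.toList_replace, PySem.Str.toList_replace, e1, e2, e3, e4, e5]
  rfl

lemma toList_simple_text_alt (text : String) :
    (simple_text_alt text).toList = simpleGo text.toList := by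
  simp [simple_text_alt]

lemma r5_no_key_prefix : ∀ X : List Char,
    ¬ (['n','e','t','w','o','r','k'] : List Char) <+:
      rep1 'n' ['e','t','w','o','r','k'] "internet connection".toList X := by
  intro X
  induction X with
  | nil => rw [rep1]; simp
  | cons c t ih =>
    by_cases hp : ('n' :: ['e','t','w','o','r','k'] : List Char) <+: (c :: t)
    · rw [rep1_pos _ _ _ _ _ hp]
      simp
    · rw [rep1_neg _ _ _ _ _ hp]
      intro hw
      obtain ⟨hc, hw'⟩ := List.cons_prefix_cons.mp hw
      exact hp (List.cons_prefix_cons.mpr ⟨hc,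
        rep1_reflect 'n' 'i' ['e','t','w','o','r','k'] "nternet connection".toList t
          ['e','t','w','o','r','k'] (by simp) hw'⟩)

lemma r5_no_inetwork : ∀ (n : Nat) (X : List Char), X.length ≤ n →
    ¬ (['i','n','e','t','w','o','r','k'] : List Char) <:+:
      rep1 'n' ['e','t','w','o','r','k'] "internet connection".toList X := by
  intro n
  induction n with
  | zero =>
    intro X hX
    have : X = [] := by cases X <;> simp_all
    subst this
    rw [rep1]; simp
  | succ n ih =>
    intro X hX
    cases X with
    | nil => rw [rep1]; simp
    | cons c t =>
      by_cases hp : ('n' :: ['e','t','w','o','r','k'] : List Char) <+: (c :: t)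
      · rw [rep1_pos _ _ _ _ _ hp]
        intro h
        rw [show ("internet connection".toList ++
            rep1 'n' ['e','t','w','o','r','k'] "internet connection".toList
              (t.drop (['e','t','w','o','r','k'] : List Char).length))
          = 'i'::'n'::'t'::'e'::'r'::'n'::'e'::'t'::' '::'c'::'o'::'n'::'n'::'e'::'c'::'t'::'i'::'o'::'n'::
            rep1 'n' ['e','t','w','o','r','k'] "internet connection".toList
              (t.drop (['e','t','w','o','r','k'] : List Char).length) from rfl] at h
        simp only [List.infix_cons_iff, List.cons_prefix_cons] at h
        simp at h
        exact ih (t.drop 6) (by simp at hX ⊢; omega) h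
      · rw [rep1_neg _ _ _ _ _ hp]
        intro h
        rcases List.infix_cons_iff.mp h with h | h
        · obtain ⟨_, hw'⟩ := List.cons_prefix_cons.mp h
          exact r5_no_key_prefix t hw'
        · exact ih t (by simp at hX ⊢; omega) h

lemma bad_infix_tail {a : Char} {t : List Char} (hne : a ≠ 'C') (h : badL <:+: a :: t) :
    badL <:+: t := by
  rcases List.infix_cons_iff.mp h with h | h
  · exact absurd (List.cons_prefix_cons.mp h).1.symm hne
  · exact h

lemma simpleGo_contains : ∀ (n : Nat) (l : List Char), l.length ≤ n → badL <:+: l →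
    (['i','n','e','t','w','o','r','k'] : List Char) <:+: simpleGo l := by
  intro n
  induction n with
  | zero =>
    intro l hl hb
    have : l = [] := by cases l <;> simp_all
    subst this
    exact absurd (List.eq_nil_of_infix_nil hb) (by simp [badL])
  | succ n ih =>
    intro l hl hb
    by_cases hbp : badL <+: l
    · obtain ⟨z, he⟩ := hbp
      rw [show (badL ++ z : List Char)
        = 'C'::'P'::'U'::'e'::'t'::'w'::'o'::'r'::'k'::z from rfl] at he
      rw [← he]
      have hsg : simpleGo ('C'::'P'::'U'::'e'::'t'::'w'::'o'::'r'::'k'::z)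
          = "computer brain".toList ++ ('e'::'t'::'w'::'o'::'r'::'k':: simpleGo z) := by
        rw [simpleGo]; simp
        rw [simpleGo]; simp
        rw [simpleGo]; simp
        rw [simpleGo]; simp
        rw [simpleGo]; simp
        rw [simpleGo]; simp
        rw [simpleGo]; simp
      rw [hsg]
      exact ⟨['c','o','m','p','u','t','e','r',' ','b','r','a'], simpleGo z, rfl⟩
    · cases l with
      | nil => exact absurd (List.eq_nil_of_infix_nil hb) (by simp [badL])
      | cons c t =>
        by_cases h1 : ['S','S','D'] <+: (c :: t)
        · obtain ⟨t3, he⟩ := h1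
          rw [show (['S','S','D'] ++ t3 : List Char) = 'S'::'S'::'D'::t3 from rfl] at he
          rw [← he] at hl hb ⊢
          have hb3 : badL <:+: t3 :=
            bad_infix_tail (by decide) (bad_infix_tail (by decide)
              (bad_infix_tail (by decide) hb))
          have hsg : simpleGo ('S'::'S'::'D'::t3) = "storage part".toList ++ simpleGo t3 := by
            rw [simpleGo]; simp
          rw [hsg]
          exact infix_of_infix_tail _ (ih t3 (by simp at hl ⊢; omega) hb3)
        · by_cases h2 : ['C','P','U'] <+: (c :: t)
          · obtain ⟨t3, he⟩ := h2
            rw [show (['C','P','U'] ++ t3 : List Char) = 'C'::'P'::'U'::t3 from rfl] at he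
            rw [← he] at hl hb hbp ⊢
            have hb1 : badL <:+: 'P'::'U'::t3 := by
              rcases List.infix_cons_iff.mp hb with h | h
              · exact absurd h hbp
              · exact h
            have hb3 : badL <:+: t3 :=
              bad_infix_tail (by decide) (bad_infix_tail (by decide) hb1)
            have hsg : simpleGo ('C'::'P'::'U'::t3) = "computer brain".toList ++ simpleGo t3 := by
              rw [simpleGo]; simp
            rw [hsg]
            exact infix_of_infix_tail _ (ih t3 (by simp at hl ⊢; omega) hb3)
          · by_cases h3 : ['R','A','M'] <+: (c :: t)
            · obtain ⟨t3, he⟩ := h3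
              rw [show (['R','A','M'] ++ t3 : List Char) = 'R'::'A'::'M'::t3 from rfl] at he
              rw [← he] at hl hb ⊢
              have hb3 : badL <:+: t3 :=
                bad_infix_tail (by decide) (bad_infix_tail (by decide)
                  (bad_infix_tail (by decide) hb))
              have hsg : simpleGo ('R'::'A'::'M'::t3)
                  = "short-term memory".toList ++ simpleGo t3 := by
                rw [simpleGo]; simp
              rw [hsg]
              exact infix_of_infix_tail _ (ih t3 (by simp at hl ⊢; omega) hb3)
            · by_cases h4 : ['G','P','U'] <+: (c :: t)
              · obtain ⟨t3, he⟩ := h4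
                rw [show (['G','P','U'] ++ t3 : List Char) = 'G'::'P'::'U'::t3 from rfl] at he
                rw [← he] at hl hb ⊢
                have hb3 : badL <:+: t3 :=
                  bad_infix_tail (by decide) (bad_infix_tail (by decide)
                    (bad_infix_tail (by decide) hb))
                have hsg : simpleGo ('G'::'P'::'U'::t3)
                    = "graphics part".toList ++ simpleGo t3 := by
                  rw [simpleGo]; simp
                rw [hsg]
                exact infix_of_infix_tail _ (ih t3 (by simp at hl ⊢; omega) hb3)
              · by_cases h5 : ['n','e','t','w','o','r','k'] <+: (c :: t)
                · obtain ⟨t7, he⟩ := h5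
                  rw [show (['n','e','t','w','o','r','k'] ++ t7 : List Char)
                    = 'n'::'e'::'t'::'w'::'o'::'r'::'k'::t7 from rfl] at he
                  rw [← he] at hl hb ⊢
                  have hb7 : badL <:+: t7 :=
                    bad_infix_tail (by decide) (bad_infix_tail (by decide)
                      (bad_infix_tail (by decide) (bad_infix_tail (by decide)
                        (bad_infix_tail (by decide) (bad_infix_tail (by decide)
                          (bad_infix_tail (by decide) hb))))))
                  have hsg : simpleGo ('n'::'e'::'t'::'w'::'o'::'r'::'k'::t7)
                      = "internet connection".toList ++ simpleGo t7 := by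
                    rw [simpleGo]; simp
                  rw [hsg]
                  exact infix_of_infix_tail _ (ih t7 (by simp at hl ⊢; omega) hb7)
                · have hbt : badL <:+: t := by
                    rcases List.infix_cons_iff.mp hb with h | h
                    · exact absurd h hbp
                    · exact h
                  have hsg : simpleGo (c :: t) = c :: simpleGo t := by
                    rw [simpleGo, if_neg h1, if_neg h2, if_neg h3, if_neg h4, if_neg h5]
                  rw [hsg]
                  exact (ih t (by simp at hl ⊢; omega) hbt).trans
                    (List.suffix_cons c (simpleGo t)).isInfix

-- ===== VERDICT (by name: the statement is the Claim_ definition above) =====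

theorem simple_text_spec : Claim_unchanged_simple_text := by
  unfold Claim_unchanged_simple_text
  intro text _ hnD
  have hbad : ¬ badL <:+: text.toList := by
    intro hb
    apply hnD
    unfold D_simple_text
    rw [PySem.Str.isIn_iff_infix]
    exact hb
  rw [← String.toList_inj, toList_simple_text, toList_simple_text_alt]
  exact chainEq_final text hbad

theorem simple_text_changed : Claim_changed_simple_text := by
  unfold Claim_changed_simple_text
  refine ⟨by decide, by decide, ?_, ?_, ?_⟩
  · rw [← String.toList_inj]; decide
  · rw [← String.toList_inj]
    simp [pvDiffWitness_simple_text, pvDiffWitnessOut_simple_text, simple_text_alt, simpleGo]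
  · rw [Ne, ← String.toList_inj]; decide

theorem simple_text_tight : Claim_exact_simple_text := by
  unfold Claim_exact_simple_text
  intro text _ hD heq
  have hbad : badL <:+: text.toList := by
    unfold D_simple_text at hD
    rw [PySem.Str.isIn_iff_infix] at hD
    exact hD
  have hB := simpleGo_contains text.toList.length text.toList le_rfl hbad
  rw [← toList_simple_text_alt, ← heq, toList_simple_text] at hB
  exact r5_no_inetwork _ _ le_rfl hB
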